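-- pv_equiv track=rewrite | github.com/aeverettTGK/sequence-processing-intro | count_var_sites.py | count_var_site
-- ===== SOURCE A (Python) =====
-- def count_var_site(seq_objects):
--     count = 0
--     sequences = list(seq_objects.values())
--     for pos in range(len(sequences[0])):
--         letters = [seq[pos] for seq in sequences]
--         if len(set(letters)) > 1:
--             count += 1
--     return count
-- ===== SOURCE B (Python) =====
-- def count_var_site(seq_objects):
--     sequences = list(seq_objects.values())
--     reference = sequences[0]
--     variable_positions = set()
--     for seq in sequences[1:]:
--         for pos in range(len(reference)):
--             if seq[pos] != reference[pos]:
--                 variable_positions.add(pos)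
--     return len(variable_positions)
-- ===== Notes on version B (the rewrite author's own statement) =====
-- stated objective: alternative
-- what changed: Instead of building a per-column letter list and a per-column set (column-major), B fixes the first sequence as reference and traverses row-major, collecting into one set the positions where any later sequence differs from the reference, returning that set's size.
import Mathlib
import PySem

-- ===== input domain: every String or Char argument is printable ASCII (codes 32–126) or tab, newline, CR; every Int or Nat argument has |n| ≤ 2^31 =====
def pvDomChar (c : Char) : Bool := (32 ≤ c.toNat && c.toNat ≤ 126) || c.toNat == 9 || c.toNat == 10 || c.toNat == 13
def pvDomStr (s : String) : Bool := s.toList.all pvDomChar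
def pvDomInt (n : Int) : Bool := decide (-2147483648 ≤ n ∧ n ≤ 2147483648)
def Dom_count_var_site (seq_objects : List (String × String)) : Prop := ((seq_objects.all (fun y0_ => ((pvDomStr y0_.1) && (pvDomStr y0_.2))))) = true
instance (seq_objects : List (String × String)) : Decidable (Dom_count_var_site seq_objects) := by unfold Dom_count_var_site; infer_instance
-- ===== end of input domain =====

-- B re-implements the column-distinct-letter count row-major: it compares each later
-- sequence against the first (the reference) and collects the differing positions in a set
-- (objective: alternative decomposition, same asymptotic cost).

-- ===== PORT A =====
-- A: for each column pos of the first value, build the list of letters in that column and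
-- count the columns whose set of letters has more than one element.
def count_var_site (seq_objects : List (String × String)) : Int :=
  let sequences := (PySem.Dict.ofList seq_objects).values
  match sequences with
  | [] => 0  -- Python raises IndexError at sequences[0]; excluded by Pre_
  | s0 :: rest =>
    (PySem.List.pyRange 0 (PySem.Str.len s0) 1).foldl
      (fun count pos =>
        let letters := (s0 :: rest).map (fun seq => PySem.Str.pyGet? seq pos)
        if 1 < PySem.Set.len (PySem.Set.ofList letters) then count + 1 else count) 0

-- ===== PORT B =====
-- B: reference = sequences[0]; for each later sequence, for each position of the reference,
-- add the position to a set when the letters differ; return the set's size.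
def count_var_site_alt (seq_objects : List (String × String)) : Int :=
  let sequences := (PySem.Dict.ofList seq_objects).values
  match sequences with
  | [] => 0  -- Python raises IndexError at sequences[0]; excluded by Pre_
  | ref :: rest =>
    PySem.Set.len
      (rest.foldl
        (fun vp seq =>
          (PySem.List.pyRange 0 (PySem.Str.len ref) 1).foldl
            (fun vp pos =>
              if PySem.Str.pyGet? seq pos ≠ PySem.Str.pyGet? ref pos then PySem.Set.add vp pos else vp)
            vp)
        PySem.Set.empty)

-- ===== PRECONDITION & SPEC =====
-- Pre_ excludes exactly the inputs where Python raises IndexError: an empty dict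
-- (sequences[0]) and dicts in which some value is shorter than the first value (seq[pos]).
def Pre_count_var_site (seq_objects : List (String × String)) : Prop :=
  (PySem.Dict.ofList seq_objects).values ≠ [] ∧
  ∀ s ∈ (PySem.Dict.ofList seq_objects).values,
    PySem.Str.len ((PySem.Dict.ofList seq_objects).values.headI) ≤ PySem.Str.len s
instance (seq_objects : List (String × String)) : Decidable (Pre_count_var_site seq_objects) := by unfold Pre_count_var_site; infer_instance
def pvWitness_count_var_site : (List (String × String)) := [("a", "ACGT"), ("b", "AGGT"), ("c", "ACGA")]
def Spec_count_var_site (seq_objects : List (String × String)) (out : Int) : Prop := out = count_var_site_alt seq_objects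
instance (seq_objects : List (String × String)) (out : Int) : Decidable (Spec_count_var_site seq_objects out) := by unfold Spec_count_var_site; infer_instance

-- ===== CLAIM (what is proved, stated in full; the proofs are below) =====
def Claim_equal_count_var_site : Prop := ∀ (seq_objects : List (String × String)), Dom_count_var_site seq_objects → Pre_count_var_site seq_objects → Spec_count_var_site seq_objects (count_var_site seq_objects)

-- ===== LEMMAS AND PROOFS =====

-- A column has more than one distinct letter iff some letter differs from the first one.
theorem set_len_cons_gt_one {α : Type} [BEq α] [LawfulBEq α] (x : α) (l : List α) :
    1 < PySem.Set.len (PySem.Set.ofList (x :: l)) ↔ ∃ y ∈ l, y ≠ x := by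
  rw [PySem.Set.ofList_cons]
  simp only [PySem.Set.len, List.length_cons]
  constructor
  · intro h
    have hpos : 0 < ((PySem.Set.ofList l).discard x).length := by omega
    obtain ⟨y, hy⟩ := List.exists_mem_of_length_pos hpos
    rw [PySem.Set.mem_discard] at hy
    exact ⟨y, (PySem.Set.mem_ofList l y).mp hy.1, hy.2⟩
  · rintro ⟨y, hyl, hyx⟩
    have hy : y ∈ (PySem.Set.ofList l).discard x :=
      (PySem.Set.mem_discard _ x y).mpr ⟨(PySem.Set.mem_ofList l y).mpr hyl, hyx⟩
    have := List.length_pos_of_mem hy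
    omega

-- The inner loop of B: membership in the accumulated set of positions.
theorem mem_inner_foldl (q : Int → Prop) [DecidablePred q] (l : List Int) (vp : PySem.Set Int) (x : Int) :
    x ∈ l.foldl (fun vp pos => if q pos then PySem.Set.add vp pos else vp) vp ↔
      x ∈ vp ∨ (x ∈ l ∧ q x) := by
  induction l generalizing vp with
  | nil => simp
  | cons p l ih =>
    simp only [List.foldl_cons, List.mem_cons]
    split_ifs with hq
    · rw [ih, PySem.Set.mem_add]
      constructor
      · rintro ((h | rfl) | ⟨h1, h2⟩)
        · exact Or.inl h
        · exact Or.inr ⟨Or.inl rfl, hq⟩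
        · exact Or.inr ⟨Or.inr h1, h2⟩
      · rintro (h | ⟨rfl | h1, h2⟩)
        · exact Or.inl (Or.inl h)
        · exact Or.inl (Or.inr rfl)
        · exact Or.inr ⟨h1, h2⟩
    · rw [ih]
      constructor
      · rintro (h | ⟨h1, h2⟩)
        · exact Or.inl h
        · exact Or.inr ⟨Or.inr h1, h2⟩
      · rintro (h | ⟨rfl | h1, h2⟩)
        · exact Or.inl h
        · exact absurd h2 hq
        · exact Or.inr ⟨h1, h2⟩

-- The inner loop preserves Nodup.
theorem nodup_inner_foldl (q : Int → Prop) [DecidablePred q] (l : List Int) (vp : PySem.Set Int)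
    (h : vp.Nodup) : (l.foldl (fun vp pos => if q pos then PySem.Set.add vp pos else vp) vp).Nodup := by
  induction l generalizing vp with
  | nil => exact h
  | cons p l ih =>
    simp only [List.foldl_cons]
    split_ifs with hq
    · exact ih _ (PySem.Set.nodup_add vp p h)
    · exact ih _ h

-- The outer loop of B: membership in the final set of variable positions.
theorem mem_outer_foldl (d : String → Int → Prop) [∀ s i, Decidable (d s i)]
    (rg : List Int) (rest : List String) (vp : PySem.Set Int) (x : Int) :
    x ∈ rest.foldl (fun vp seq => rg.foldl (fun vp pos => if d seq pos then PySem.Set.add vp pos else vp) vp) vp ↔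
      x ∈ vp ∨ (x ∈ rg ∧ ∃ s ∈ rest, d s x) := by
  induction rest generalizing vp with
  | nil => simp
  | cons s rest ih =>
    simp only [List.foldl_cons, ih, mem_inner_foldl, List.mem_cons]
    constructor
    · rintro ((h | ⟨h1, h2⟩) | ⟨h1, t, ht, hd⟩)
      · exact Or.inl h
      · exact Or.inr ⟨h1, s, Or.inl rfl, h2⟩
      · exact Or.inr ⟨h1, t, Or.inr ht, hd⟩
    · rintro (h | ⟨h1, t, (rfl | ht), hd⟩)
      · exact Or.inl (Or.inl h)
      · exact Or.inl (Or.inr ⟨h1, hd⟩)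
      · exact Or.inr ⟨h1, t, ht, hd⟩

-- The outer loop preserves Nodup.
theorem nodup_outer_foldl (d : String → Int → Prop) [∀ s i, Decidable (d s i)]
    (rg : List Int) (rest : List String) (vp : PySem.Set Int) (h : vp.Nodup) :
    (rest.foldl (fun vp seq => rg.foldl (fun vp pos => if d seq pos then PySem.Set.add vp pos else vp) vp) vp).Nodup := by
  induction rest generalizing vp with
  | nil => exact h
  | cons s rest ih => exact ih _ (nodup_inner_foldl _ _ _ h)

-- Core equality, stated on the list of sequences.
theorem core_eq (s0 : String) (rest : List String) :
    (PySem.List.pyRange 0 (PySem.Str.len s0) 1).foldl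
      (fun count pos =>
        if 1 < PySem.Set.len (PySem.Set.ofList ((s0 :: rest).map (fun seq => PySem.Str.pyGet? seq pos)))
        then count + 1 else count) 0 =
    PySem.Set.len
      (rest.foldl
        (fun vp seq =>
          (PySem.List.pyRange 0 (PySem.Str.len s0) 1).foldl
            (fun vp pos =>
              if PySem.Str.pyGet? seq pos ≠ PySem.Str.pyGet? s0 pos then PySem.Set.add vp pos else vp)
            vp)
        PySem.Set.empty) := by
  set rg := PySem.List.pyRange 0 (PySem.Str.len s0) 1 with hrg
  -- A's count is the number of positions in rg whose column differs somewhere from s0's letter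
  have hA : (rg.foldl
      (fun count pos =>
        if 1 < PySem.Set.len (PySem.Set.ofList ((s0 :: rest).map (fun seq => PySem.Str.pyGet? seq pos)))
        then count + 1 else count) 0) =
      ((rg.filter (fun pos => decide (∃ s ∈ rest, PySem.Str.pyGet? s pos ≠ PySem.Str.pyGet? s0 pos))).length : Int) := by
    rw [PySem.List.foldl_ite_add_one
      (fun pos => 1 < PySem.Set.len (PySem.Set.ofList ((s0 :: rest).map (fun seq => PySem.Str.pyGet? seq pos)))) rg 0,
      List.countP_eq_length_filter]
    have : ∀ pos : Int,
        (decide (1 < PySem.Set.len (PySem.Set.ofList ((s0 :: rest).map (fun seq => PySem.Str.pyGet? seq pos))))) =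
        (decide (∃ s ∈ rest, PySem.Str.pyGet? s pos ≠ PySem.Str.pyGet? s0 pos)) := by
      intro pos
      simp only [List.map_cons, decide_eq_decide, set_len_cons_gt_one]
      constructor
      · rintro ⟨y, hy, hne⟩
        obtain ⟨s, hs, rfl⟩ := List.mem_map.mp hy
        exact ⟨s, hs, hne⟩
      · rintro ⟨s, hs, hne⟩
        exact ⟨PySem.Str.pyGet? s pos, List.mem_map.mpr ⟨s, hs, rfl⟩, hne⟩
    simp only [zero_add, this]
  rw [hA]
  -- B's set is Nodup with the same membership as the filtered range
  set S := (rest.foldl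
        (fun vp seq =>
          rg.foldl
            (fun vp pos =>
              if PySem.Str.pyGet? seq pos ≠ PySem.Str.pyGet? s0 pos then PySem.Set.add vp pos else vp)
            vp)
        PySem.Set.empty) with hS
  have hnodS : S.Nodup :=
    nodup_outer_foldl (fun s pos => PySem.Str.pyGet? s pos ≠ PySem.Str.pyGet? s0 pos) rg rest _ List.nodup_nil
  have hnodF : (rg.filter (fun pos => decide (∃ s ∈ rest, PySem.Str.pyGet? s pos ≠ PySem.Str.pyGet? s0 pos))).Nodup := by
    exact List.Nodup.filter _ (hrg ▸ PySem.List.nodup_pyRange_one 0 (PySem.Str.len s0))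
  have hperm : (rg.filter (fun pos => decide (∃ s ∈ rest, PySem.Str.pyGet? s pos ≠ PySem.Str.pyGet? s0 pos))).Perm S := by
    rw [List.perm_ext_iff_of_nodup hnodF hnodS]
    intro x
    rw [hS, mem_outer_foldl (fun s pos => PySem.Str.pyGet? s pos ≠ PySem.Str.pyGet? s0 pos), List.mem_filter]
    simp
  rw [PySem.Set.len, hperm.length_eq]

-- ===== VERDICT (by name: the statement is the Claim_ definition above) =====
theorem count_var_site_spec : Claim_equal_count_var_site := by
  intro seq_objects _ _
  unfold Spec_count_var_site count_var_site count_var_site_alt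
  cases h : (PySem.Dict.ofList seq_objects).values with
  | nil => rfl
  | cons s0 rest => exact core_eq s0 rest
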